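-- pv_equiv track=rewrite | github.com/poly4/fpl-analsyer | fpl-h2h-analyzer/backend/app/middleware/performance.py | _path_matches
-- ===== SOURCE A (Python) =====
-- def _path_matches(path: str, pattern: str) -> bool:
--     """Check if path matches pattern with wildcards"""
--     path_segments = path.split('/')
--     pattern_segments = pattern.split('/')
--
--     if len(path_segments) != len(pattern_segments):
--         return False
--
--     for path_seg, pattern_seg in zip(path_segments, pattern_segments):
--         if pattern_seg.startswith('{') and pattern_seg.endswith('}'):
--             continue  # Wildcard matches anything
--         if path_seg != pattern_seg:
--             return False
--
--     return True
-- ===== SOURCE B (Python) =====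
-- def _path_matches(path: str, pattern: str) -> bool:
--     """Check if path matches pattern with wildcards, scanning segment-by-segment
--     without splitting: peel the first segment off each string with find/slice each step."""
--     while True:
--         pi = path.find('/')
--         qi = pattern.find('/')
--         path_seg = path if pi < 0 else path[:pi]
--         pattern_seg = pattern if qi < 0 else pattern[:qi]
--         if not (pattern_seg.startswith('{') and pattern_seg.endswith('}')) and path_seg != pattern_seg:
--             return False
--         if pi < 0 and qi < 0:
--             return True
--         if pi < 0 or qi < 0:
--             return False
--         path = path[pi + 1:]
--         pattern = pattern[qi + 1:]
-- ===== Notes on version B (the rewrite author's own statement) =====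
-- stated objective: alternative
-- what changed: Replaces split-into-lists + length check + zip loop by a single recursive scan that peels the first segment off each raw string with find/slice and recurses on the tails; no segment lists or length comparison are built.
import Mathlib
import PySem

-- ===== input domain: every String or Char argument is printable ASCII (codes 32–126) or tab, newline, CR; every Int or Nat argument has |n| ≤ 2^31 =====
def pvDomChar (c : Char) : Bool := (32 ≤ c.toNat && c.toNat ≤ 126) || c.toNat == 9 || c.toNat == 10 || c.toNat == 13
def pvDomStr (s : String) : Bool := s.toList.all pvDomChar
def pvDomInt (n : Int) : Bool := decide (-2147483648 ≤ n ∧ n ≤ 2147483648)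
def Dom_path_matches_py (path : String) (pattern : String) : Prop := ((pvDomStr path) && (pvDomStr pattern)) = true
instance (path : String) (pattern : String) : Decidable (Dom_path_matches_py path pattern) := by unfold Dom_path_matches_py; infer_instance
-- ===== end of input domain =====

-- B replaces A's split/length-check/zip loop by one scan that peels the first segment off
-- each raw string with find/slice per step (alternative decomposition; same values everywhere).

-- ===== PORT A =====
-- literal port of A: split both strings on '/', compare segment counts, then the zip loop
-- (the early-return-False loop over the zipped segments is the List.all fold)
def path_matches_py (path : String) (pattern : String) : Bool :=
  let ps := PySem.Chars.splitOn path.toList ['/']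
  let qs := PySem.Chars.splitOn pattern.toList ['/']
  if ps.length ≠ qs.length then false
  else (ps.zip qs).all (fun pq =>
    if PySem.Chars.startswith pq.2 ['{'] && PySem.Chars.endswith pq.2 ['}'] then true
    else pq.1 == pq.2)

-- ===== PORT B =====
-- literal port of Source B: its while loop is this recursion over the same state; each step computes
-- path.find('/') / pattern.find('/'), the leading segments via slices, checks them, and loops on the tails
def path_matches_py_altGo (p : List Char) (q : List Char) : Bool :=
  let pi := PySem.Chars.find p ['/']
  let qi := PySem.Chars.find q ['/']
  let pseg := if pi < 0 then p else PySem.Chars.slice p none (some pi)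
  let qseg := if qi < 0 then q else PySem.Chars.slice q none (some qi)
  if ¬(PySem.Chars.startswith qseg ['{'] && PySem.Chars.endswith qseg ['}']) = true ∧ pseg ≠ qseg then false
  else if pi < 0 ∧ qi < 0 then true
  else if pi < 0 ∨ qi < 0 then false
  else path_matches_py_altGo (PySem.Chars.slice p (some (pi + 1)) none)
                             (PySem.Chars.slice q (some (qi + 1)) none)
termination_by p.length
decreasing_by
  simp only [PySem.Chars.slice_eq_listSlice]
  have hpi : 0 ≤ PySem.Chars.find p ['/'] := by
    rcases not_or.mp (by assumption) with ⟨h0, -⟩; exact not_lt.mp h0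
  have hinf : ['/'] <:+: p := (PySem.Chars.find_nonneg_iff _ _).mp hpi
  have hlen : 1 ≤ p.length := by simpa using hinf.length_le
  rw [PySem.List.slice_from]
  · simp only [List.length_drop]; omega
  · omega

def path_matches_py_alt (path : String) (pattern : String) : Bool :=
  path_matches_py_altGo path.toList pattern.toList

-- ===== PRECONDITION & SPEC =====
def Spec_path_matches_py (path : String) (pattern : String) (out : Bool) : Prop := out = path_matches_py_alt path pattern
instance (path : String) (pattern : String) (out : Bool) : Decidable (Spec_path_matches_py path pattern out) := by unfold Spec_path_matches_py; infer_instance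

-- ===== CLAIM (what is proved, stated in full; the proofs are below) =====
def Claim_equal_path_matches_py : Prop := ∀ (path : String) (pattern : String), Dom_path_matches_py path pattern → Spec_path_matches_py path pattern (path_matches_py path pattern)

-- ===== LEMMAS AND PROOFS =====

-- reference splitter used only by the proofs
def pmSplit : List Char → List (List Char)
  | [] => [[]]
  | c :: r =>
    if c = '/' then [] :: pmSplit r
    else match pmSplit r with
         | [] => [[c]]
         | s :: ss => (c :: s) :: ss

theorem pmSplit_ne_nil (p : List Char) : pmSplit p ≠ [] := by
  cases p with
  | nil => simp [pmSplit]
  | cons c r =>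
    simp only [pmSplit]
    split
    · simp
    · split <;> simp

theorem pm_findGo_char (l : List Char) (k : Nat) :
    PySem.Chars.find.go ['/'] l k =
      if '/' ∈ l then (((k + (l.takeWhile (· ≠ '/')).length : Nat) : Nat) : Int) else -1 := by
  induction l generalizing k with
  | nil => simp [PySem.Chars.find.go]
  | cons c r ih =>
    by_cases hc : c = '/'
    · subst hc
      simp [PySem.Chars.find.go, List.isPrefixOf, List.takeWhile]
    · rw [PySem.Chars.find.go]
      have hpre : ['/'].isPrefixOf (c :: r) = false := by
        simp [List.isPrefixOf]; exact fun h => absurd h.symm hc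
      rw [hpre]
      simp only [ih (k+1), List.mem_cons, List.takeWhile]
      by_cases hm : '/' ∈ r
      · simp [hm, hc, Ne.symm hc]; ring
      · simp [hm, Ne.symm hc]

theorem pm_find_char (p : List Char) :
    PySem.Chars.find p ['/'] =
      if '/' ∈ p then (((p.takeWhile (· ≠ '/')).length : Nat) : Int) else -1 := by
  rw [PySem.Chars.find, pm_findGo_char]; simp

theorem pm_splitOnGo (l : List Char) (fuel : Nat) (cur : List Char) (acc : List (List Char))
    (h : l.length < fuel) :
    PySem.Chars.splitOn.go ['/'] fuel l cur acc =
      acc.reverse ++ ((cur.reverse ++ (pmSplit l).headI) :: (pmSplit l).tail) := by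
  induction l generalizing fuel cur acc with
  | nil =>
    cases fuel with
    | zero => omega
    | succ f => simp [PySem.Chars.splitOn.go, pmSplit]
  | cons c r ih =>
    cases fuel with
    | zero => omega
    | succ f =>
      rw [PySem.Chars.splitOn.go]
      by_cases hc : c = '/'
      · subst hc
        have hpre : ['/'].isPrefixOf ('/' :: r) = true := by simp [List.isPrefixOf]
        rw [hpre]
        simp only [if_true, List.length_singleton, List.drop_succ_cons, List.drop_zero]
        rw [ih f [] (cur.reverse :: acc) (by simpa using Nat.lt_of_succ_lt_succ h)]
        have := pmSplit_ne_nil r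
        cases hr : pmSplit r with
        | nil => exact absurd hr this
        | cons s ss => simp [pmSplit, hr]
      · have hpre : ['/'].isPrefixOf (c :: r) = false := by
          simp [List.isPrefixOf]; exact fun h => absurd h.symm hc
        rw [hpre]
        simp only [Bool.false_eq_true, if_false]
        rw [ih f (c :: cur) acc (by simpa using Nat.lt_of_succ_lt_succ h)]
        have := pmSplit_ne_nil r
        cases hr : pmSplit r with
        | nil => exact absurd hr this
        | cons s ss => simp [pmSplit, hc, hr]

theorem pm_splitOn_eq (p : List Char) : PySem.Chars.splitOn p ['/'] = pmSplit p := by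
  rw [PySem.Chars.splitOn, pm_splitOnGo p (p.length+1) [] [] (by omega)]
  have := pmSplit_ne_nil p
  cases hp : pmSplit p with
  | nil => exact absurd hp this
  | cons s ss => simp

theorem pmSplit_noslash (p : List Char) (h : '/' ∉ p) : pmSplit p = [p] := by
  induction p with
  | nil => simp [pmSplit]
  | cons c r ih =>
    have hc : c ≠ '/' := fun hc => h (hc ▸ List.mem_cons_self)
    have hr : '/' ∉ r := fun hm => h (List.mem_cons_of_mem _ hm)
    simp [pmSplit, hc, ih hr]

theorem pmSplit_slash (p : List Char) (h : '/' ∈ p) :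
    pmSplit p = (p.takeWhile (· ≠ '/')) :: pmSplit ((p.dropWhile (· ≠ '/')).tail) := by
  induction p with
  | nil => simp at h
  | cons c r ih =>
    by_cases hc : c = '/'
    · subst hc; simp [pmSplit, List.takeWhile, List.dropWhile]
    · have hr : '/' ∈ r := by
        rcases List.mem_cons.mp h with h1 | h1
        · exact absurd h1.symm hc
        · exact h1
      rw [pmSplit]
      simp only [if_neg hc, ih hr]
      simp [List.takeWhile, List.dropWhile, hc]

theorem pm_decomp (p : List Char) (h : '/' ∈ p) :
    p = (p.takeWhile (· ≠ '/')) ++ '/' :: ((p.dropWhile (· ≠ '/')).tail) := by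
  induction p with
  | nil => simp at h
  | cons c r ih =>
    by_cases hc : c = '/'
    · subst hc; simp [List.takeWhile, List.dropWhile]
    · have hr : '/' ∈ r := by
        rcases List.mem_cons.mp h with h1 | h1
        · exact absurd h1.symm hc
        · exact h1
      simp only [List.takeWhile, List.dropWhile]
      simpa [hc] using congrArg (c :: ·) (ih hr)

-- the A-side body, as a function of the two segment lists
def pmA (ps qs : List (List Char)) : Bool :=
  if ps.length ≠ qs.length then false
  else (ps.zip qs).all (fun pq =>
    if PySem.Chars.startswith pq.2 ['{'] && PySem.Chars.endswith pq.2 ['}'] then true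
    else pq.1 == pq.2)

theorem pm_main (p q : List Char) :
    pmA (pmSplit p) (pmSplit q) = path_matches_py_altGo p q := by
  rw [path_matches_py_altGo]
  by_cases hps : '/' ∈ p <;> by_cases hqs : '/' ∈ q
  · -- both contain '/'
    have hdp := pm_decomp p hps
    have hdq := pm_decomp q hqs
    set tp := p.takeWhile (· ≠ '/') with htp
    set tq := q.takeWhile (· ≠ '/') with htq
    set rp := (p.dropWhile (· ≠ '/')).tail with hrp
    set rq := (q.dropWhile (· ≠ '/')).tail with hrq
    have hlen : p.length = tp.length + 1 + rp.length := by
      conv_lhs => rw [hdp]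
      rw [List.length_append, List.length_cons]
      omega
    have hrec : path_matches_py_altGo rp rq = pmA (pmSplit rp) (pmSplit rq) :=
      (pm_main rp rq).symm
    simp only [pm_find_char, if_pos hps, if_pos hqs, pmSplit_slash p hps, pmSplit_slash q hqs,
      ← htp, ← htq, ← hrp, ← hrq]
    have hc1 : ¬((tp.length : Int) < 0) := by omega
    have hc2 : ¬((tq.length : Int) < 0) := by omega
    simp only [hc1, hc2, false_and, if_false, or_self]
    have hsegp : PySem.Chars.slice p none (some (tp.length : Int)) = tp := by
      rw [PySem.Chars.slice_eq_listSlice, PySem.List.slice_to_natCast]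
      conv_lhs => rw [hdp]
      simp
    have hsegq : PySem.Chars.slice q none (some (tq.length : Int)) = tq := by
      rw [PySem.Chars.slice_eq_listSlice, PySem.List.slice_to_natCast]
      conv_lhs => rw [hdq]
      simp
    have hdropp : PySem.Chars.slice p (some ((tp.length : Int) + 1)) none = rp := by
      rw [PySem.Chars.slice_eq_listSlice]
      have : (tp.length : Int) + 1 = ((tp.length + 1 : Nat) : Int) := by push_cast; ring
      rw [this, PySem.List.slice_from_natCast]
      conv_lhs => rw [hdp]
      simp [List.drop_append]
    have hdropq : PySem.Chars.slice q (some ((tq.length : Int) + 1)) none = rq := by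
      rw [PySem.Chars.slice_eq_listSlice]
      have : (tq.length : Int) + 1 = ((tq.length + 1 : Nat) : Int) := by push_cast; ring
      rw [this, PySem.List.slice_from_natCast]
      conv_lhs => rw [hdq]
      simp [List.drop_append]
    rw [hsegp, hsegq, hdropp, hdropq, hrec]
    by_cases hw : (PySem.Chars.startswith tq ['{'] && PySem.Chars.endswith tq ['}']) = true
    · simp [pmA, hw]
    · by_cases heq : tp = tq
      · simp [pmA, hw, heq]
      · simp [pmA, hw, heq]
  · -- '/' in p only
    have h2 := pmSplit_ne_nil ((p.dropWhile (· ≠ '/')).tail)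
    simp only [pm_find_char, if_pos hps, if_neg hqs, pmSplit_slash p hps, pmSplit_noslash q hqs]
    have hA : pmA ((p.takeWhile (· ≠ '/')) :: pmSplit ((p.dropWhile (· ≠ '/')).tail)) [q] = false := by
      have : 1 ≤ (pmSplit ((p.dropWhile (· ≠ '/')).tail)).length := List.length_pos_of_ne_nil h2
      simp only [pmA, List.length_cons, List.length_nil]
      rw [if_pos (by omega)]
    rw [hA]
    simp
  · -- '/' in q only
    have h2 := pmSplit_ne_nil ((q.dropWhile (· ≠ '/')).tail)
    simp only [pm_find_char, if_neg hps, if_pos hqs, pmSplit_noslash p hps, pmSplit_slash q hqs]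
    have hA : pmA [p] ((q.takeWhile (· ≠ '/')) :: pmSplit ((q.dropWhile (· ≠ '/')).tail)) = false := by
      have : 1 ≤ (pmSplit ((q.dropWhile (· ≠ '/')).tail)).length := List.length_pos_of_ne_nil h2
      simp only [pmA, List.length_cons, List.length_nil]
      rw [if_pos (by omega)]
    rw [hA]
    simp
  · -- no '/'
    simp only [pm_find_char, if_neg hps, if_neg hqs, pmSplit_noslash p hps, pmSplit_noslash q hqs]
    norm_num
    by_cases hw : (PySem.Chars.startswith q ['{'] && PySem.Chars.endswith q ['}']) = true
    · simp [pmA, hw]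
    · by_cases heq : p = q
      · simp [pmA, hw, heq]
      · simp [pmA, hw, heq]
termination_by p.length
decreasing_by rw [← hrp]; omega

-- ===== VERDICT (by name: the statement is the Claim_ definition above) =====
theorem path_matches_py_spec : Claim_equal_path_matches_py := by
  intro path pattern _
  unfold Spec_path_matches_py path_matches_py path_matches_py_alt
  simp only [pm_splitOn_eq]
  exact pm_main path.toList pattern.toList
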